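-- pv_equiv track=rewrite | github.com/Arich-project/CausalConf | tuning_spark/test_kit/ultimate/src/deel_data.py | get_similar_ds
-- ===== SOURCE A (Python) =====
-- def get_similar_ds(input_workload,input_datasize,datasize_list):
--     similar_ds = []
--     similar_index = []
--     ds_num_list = datasize_list[input_workload]
--     distances = [abs(input_datasize-num) for num in ds_num_list]
--     min_distance = min(distances)
--     closest_numbers = [[i, ds_num_list[i]] for i, dist in enumerate(distances) if dist == min_distance]
--     # closest_indices = [i for i, dist in enumerate(distances) if dist == min_distance]
--     # return closest_numbers, closest_indices
--     for closest_num in closest_numbers: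
--         similar_index.append(closest_num[0])
--         similar_ds.append(closest_num[-1])
--
--     similar_ds_sort = sorted(range(len(distances)), key=lambda i: distances[i])
--
--     return similar_ds, similar_index, min_distance, similar_ds_sort
-- ===== SOURCE B (Python) =====
-- def get_similar_ds(input_workload, input_datasize, datasize_list):
--     # single left-to-right scan keeping the running minimum and its tie group
--     ds_num_list = datasize_list[input_workload]
--     min_distance = abs(input_datasize - ds_num_list[0])
--     similar_index = [0]
--     k = 1
--     for num in ds_num_list[1:]:
--         d = abs(input_datasize - num)
--         if d < min_distance:
--             min_distance = d
--             similar_index = [k]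
--         elif d == min_distance:
--             similar_index.append(k)
--         k += 1
--     similar_ds = [ds_num_list[i] for i in similar_index]
--     similar_ds_sort = sorted(range(len(ds_num_list)),
--                              key=lambda i: abs(input_datasize - ds_num_list[i]))
--     return similar_ds, similar_index, min_distance, similar_ds_sort
-- ===== Notes on version B (the rewrite author's own statement) =====
-- stated objective: alternative
-- what changed: A materialises a distances list and scans it three times (min(), a filter of enumerate, and a keyed index sort over it); B finds the minimum distance and its tie group of indices in one explicit running-minimum scan with an accumulator that resets on a new minimum, never building the distances list, and sorts the indices by recomputing the distance in the key.
-- outside the precondition, e.g. on get_similar_ds('a', 3, {'b': [1]}): A raises KeyError, B raises KeyError; on get_similar_ds('a', 3, {'a': []}): A raises ValueError, B raises IndexError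
import Mathlib
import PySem

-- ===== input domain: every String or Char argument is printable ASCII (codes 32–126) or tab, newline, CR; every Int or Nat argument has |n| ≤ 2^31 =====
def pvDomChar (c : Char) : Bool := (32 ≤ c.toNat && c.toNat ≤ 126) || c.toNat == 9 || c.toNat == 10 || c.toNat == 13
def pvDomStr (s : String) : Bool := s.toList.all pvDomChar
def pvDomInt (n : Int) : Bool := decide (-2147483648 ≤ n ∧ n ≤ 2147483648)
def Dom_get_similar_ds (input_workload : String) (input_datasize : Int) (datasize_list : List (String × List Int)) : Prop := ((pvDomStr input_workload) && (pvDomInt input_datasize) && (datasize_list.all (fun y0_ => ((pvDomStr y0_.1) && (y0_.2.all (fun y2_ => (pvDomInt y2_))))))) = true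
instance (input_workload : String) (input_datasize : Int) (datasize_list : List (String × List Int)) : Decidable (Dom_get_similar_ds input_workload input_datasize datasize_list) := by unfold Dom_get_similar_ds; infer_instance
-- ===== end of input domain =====

-- B replaces A's three scans over a materialised distances list (min(), a filter of enumerate,
-- a keyed index sort) by one explicit running-minimum scan that carries the tie group of indices
-- and resets it on a new minimum; the distances list is never built.

-- ===== PORT A =====
def get_similar_ds (input_workload : String) (input_datasize : Int) (datasize_list : List (String × List Int)) : List Int × List Int × Int × List Int :=
  -- datasize_list[input_workload]: first-match dict lookup; missing key = KeyError, excluded by Pre_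
  let ds_num_list := ((datasize_list.find? (fun p => p.1 == input_workload)).map (fun p => p.2)).getD []
  let distances := ds_num_list.map (fun num => |input_datasize - num|)
  match PySem.List.min? distances (fun x => x) with
  | none => ([], [], 0, [])  -- min([]) raises ValueError; excluded by Pre_
  | some min_distance =>
    let closest_numbers := ((PySem.List.enumerate distances).filter (fun p => p.2 == min_distance)).map
      (fun p => (p.1, PySem.List.pyGetD ds_num_list p.1 0))
    let similar_index := closest_numbers.map (fun c => c.1)
    let similar_ds := closest_numbers.map (fun c => c.2)
    let similar_ds_sort := PySem.List.sorted (PySem.List.pyRange 0 (PySem.List.len distances))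
        (fun i => PySem.List.pyGetD distances i 0) false
    (similar_ds, similar_index, min_distance, similar_ds_sort)

-- ===== PORT B =====
-- the for-loop of Source B: index k, running minimum best, accumulator acc of its tie indices
def pvScan (input_datasize : Int) : List Int → Int → Int → List Int → Int × List Int
  | [], _, best, acc => (best, acc)
  | num :: rest, k, best, acc =>
    let d := |input_datasize - num|
    if d < best then pvScan input_datasize rest (k + 1) d [k]
    else if d == best then pvScan input_datasize rest (k + 1) best (acc ++ [k])
    else pvScan input_datasize rest (k + 1) best acc

def get_similar_ds_alt (input_workload : String) (input_datasize : Int) (datasize_list : List (String × List Int)) : List Int × List Int × Int × List Int :=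
  let ds_num_list := ((datasize_list.find? (fun p => p.1 == input_workload)).map (fun p => p.2)).getD []
  match ds_num_list with
  | [] => ([], [], 0, [])  -- ds_num_list[0] raises IndexError; excluded by Pre_
  | d0 :: rest =>
    let st := pvScan input_datasize rest 1 (|input_datasize - d0|) [0]
    let min_distance := st.1
    let similar_index := st.2
    let similar_ds := similar_index.map (fun i => PySem.List.pyGetD ds_num_list i 0)
    let similar_ds_sort := PySem.List.sorted (PySem.List.pyRange 0 (PySem.List.len ds_num_list))
        (fun i => |input_datasize - PySem.List.pyGetD ds_num_list i 0|) false
    (similar_ds, similar_index, min_distance, similar_ds_sort)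

-- ===== PRECONDITION & SPEC =====
-- Pre_ excludes exactly the inputs where A raises: a workload key absent from the dict (KeyError)
-- or one mapped to an empty datasize list (ValueError from min([])).
def Pre_get_similar_ds (input_workload : String) (input_datasize : Int) (datasize_list : List (String × List Int)) : Prop :=
  ((datasize_list.find? (fun p => p.1 == input_workload)).map (fun p => p.2)).getD [] ≠ []
instance (input_workload : String) (input_datasize : Int) (datasize_list : List (String × List Int)) : Decidable (Pre_get_similar_ds input_workload input_datasize datasize_list) := by unfold Pre_get_similar_ds; infer_instance
def pvWitness_get_similar_ds : String × Int × (List (String × List Int)) := ("a", 3, [("a", [1, 5, 5])])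

def Spec_get_similar_ds (input_workload : String) (input_datasize : Int) (datasize_list : List (String × List Int)) (out : List Int × List Int × Int × List Int) : Prop := out = get_similar_ds_alt input_workload input_datasize datasize_list
instance (input_workload : String) (input_datasize : Int) (datasize_list : List (String × List Int)) (out : List Int × List Int × Int × List Int) : Decidable (Spec_get_similar_ds input_workload input_datasize datasize_list out) := by unfold Spec_get_similar_ds; infer_instance

-- ===== CLAIM (what is proved, stated in full; the proofs are below) =====
def Claim_equal_get_similar_ds : Prop := ∀ (input_workload : String) (input_datasize : Int) (datasize_list : List (String × List Int)), Dom_get_similar_ds input_workload input_datasize datasize_list → Pre_get_similar_ds input_workload input_datasize datasize_list → Spec_get_similar_ds input_workload input_datasize datasize_list (get_similar_ds input_workload input_datasize datasize_list)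

-- ===== LEMMAS AND PROOFS =====

-- indices (from k on) of the elements of l at distance exactly m
def pvIdxF (ids : Int) : List Int → Int → Int → List Int
  | [], _, _ => []
  | x :: t, k, m => if |ids - x| = m then k :: pvIdxF ids t (k + 1) m else pvIdxF ids t (k + 1) m

theorem pv_foldl_min_le (l : List Int) : ∀ b : Int, l.foldl min b ≤ b := by
  induction l with
  | nil => intro b; simp
  | cons x t ih =>
    intro b
    calc (x :: t).foldl min b = t.foldl min (min b x) := by simp
    _ ≤ min b x := ih _
    _ ≤ b := min_le_left _ _

-- characterisation of the scan: it returns the minimum of best and all distances, together with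
-- the accumulator (kept iff best stays minimal) followed by the indices achieving that minimum
theorem pvScan_spec (ids : Int) (l : List Int) : ∀ (k best : Int) (acc : List Int),
    pvScan ids l k best acc =
      ((l.map (fun num => |ids - num|)).foldl min best,
       (if (l.map (fun num => |ids - num|)).foldl min best = best then acc else []) ++
         pvIdxF ids l k ((l.map (fun num => |ids - num|)).foldl min best)) := by
  induction l with
  | nil => intro k best acc; simp [pvScan, pvIdxF]
  | cons x t ih =>
    intro k best acc
    have hM : ∀ b : Int, ((x :: t).map (fun num => |ids - num|)).foldl min b =
        (t.map (fun num => |ids - num|)).foldl min (min b |ids - x|) := by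
      intro b; simp
    by_cases h1 : |ids - x| < best
    · have hmin : min best |ids - x| = |ids - x| := min_eq_right (le_of_lt h1)
      have hle := pv_foldl_min_le (t.map (fun num => |ids - num|)) (|ids - x|)
      rw [hM, hmin]
      simp only [pvScan, if_pos h1, ih]
      rw [if_neg (by omega : ¬ (t.map (fun num => |ids - num|)).foldl min (|ids - x|) = best)]
      simp only [pvIdxF]
      by_cases h2 : |ids - x| = (t.map (fun num => |ids - num|)).foldl min (|ids - x|)
      · rw [if_pos h2.symm, if_pos h2]; simp
      · rw [if_neg (fun hh => h2 hh.symm), if_neg h2]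
    · have hmin : min best |ids - x| = best := min_eq_left (le_of_not_gt h1)
      have hle := pv_foldl_min_le (t.map (fun num => |ids - num|)) best
      rw [hM, hmin]
      by_cases h2 : |ids - x| = best
      · simp only [pvScan, h2, beq_self_eq_true, if_pos, if_neg (lt_irrefl best), ih]
        simp only [pvIdxF]
        by_cases h3 : (t.map (fun num => |ids - num|)).foldl min best = best
        · have hx : |ids - x| = (t.map (fun num => |ids - num|)).foldl min best := by omega
          rw [if_pos h3, if_pos h3, if_pos hx]; simp
        · have hx : ¬ |ids - x| = (t.map (fun num => |ids - num|)).foldl min best := by omega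
          rw [if_neg h3, if_neg h3, if_neg hx]
      · have hb : (|ids - x| == best) = false := by simp [h2]
        have hd : ¬ |ids - x| < best := h1
        simp only [pvScan, hb, Bool.false_eq_true, if_false, if_neg hd, ih]
        simp only [pvIdxF]
        rw [if_neg (by omega : ¬ |ids - x| = (t.map (fun num => |ids - num|)).foldl min best)]

-- A's filtered enumerate over the distances list yields exactly the pvIdxF indices
theorem pv_enum_filter (ids m : Int) (l : List Int) : ∀ k : Int,
    ((PySem.List.enumerate (l.map (fun num => |ids - num|)) k).filter
        (fun p => p.2 == m)).map Prod.fst = pvIdxF ids l k m := by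
  induction l with
  | nil => intro k; simp [PySem.List.enumerate_nil, pvIdxF]
  | cons x t ih =>
    intro k
    rw [List.map_cons, PySem.List.enumerate_cons]
    by_cases h : |ids - x| = m
    · simp only [List.filter_cons, h, beq_self_eq_true, if_pos, List.map_cons, pvIdxF, ih]
    · have hb : (|ids - x| == m) = false := by simp [h]
      simp only [List.filter_cons, hb, Bool.false_eq_true, if_false, pvIdxF, h, ih]

-- sorted() with keys that agree on the list's elements
theorem pv_insertBy_congr (k1 k2 : Int → Int) (x : Int) (acc : List Int)
    (hx : k1 x = k2 x) (hacc : ∀ a ∈ acc, k1 a = k2 a) :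
    PySem.List.insertBy (fun a b => decide (k1 a < k1 b)) x acc =
    PySem.List.insertBy (fun a b => decide (k2 a < k2 b)) x acc := by
  induction acc with
  | nil => rfl
  | cons a t ih =>
    have ha : k1 a = k2 a := hacc a (by simp)
    simp only [PySem.List.insertBy, hx, ha]
    split_ifs with h
    · rfl
    · rw [ih (fun b hb => hacc b (by simp [hb]))]

theorem pv_sorted_congr_aux (k1 k2 : Int → Int) (xs : List Int) : ∀ (acc : List Int),
    (∀ x ∈ xs, k1 x = k2 x) → (∀ a ∈ acc, k1 a = k2 a) →
    xs.foldl (fun acc x => PySem.List.insertBy (fun a b => decide (k1 a < k1 b)) x acc) acc =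
    xs.foldl (fun acc x => PySem.List.insertBy (fun a b => decide (k2 a < k2 b)) x acc) acc := by
  induction xs with
  | nil => intro acc _ _; rfl
  | cons x t ih =>
    intro acc hxs hacc
    simp only [List.foldl_cons]
    rw [pv_insertBy_congr k1 k2 x acc (hxs x (by simp)) hacc]
    apply ih _ (fun y hy => hxs y (by simp [hy]))
    intro a ha
    rcases (PySem.List.mem_insertBy _ _ _ _).mp ha with rfl | ha'
    · exact hxs a (by simp)
    · exact hacc a ha'

theorem pv_sorted_congr (k1 k2 : Int → Int) (xs : List Int)
    (h : ∀ x ∈ xs, k1 x = k2 x) :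
    PySem.List.sorted xs k1 false = PySem.List.sorted xs k2 false := by
  rw [PySem.List.sorted_eq_foldl_insertBy, PySem.List.sorted_eq_foldl_insertBy]
  exact pv_sorted_congr_aux k1 k2 xs [] h (by simp)

theorem pv_main (ids d0 : Int) (rest : List Int) :
    (let distances := (d0 :: rest).map (fun num => |ids - num|)
     match PySem.List.min? distances (fun x => x) with
     | none => ([], [], 0, [])
     | some min_distance =>
       let closest_numbers := ((PySem.List.enumerate distances).filter (fun (p : Int × Int) => p.2 == min_distance)).map
         (fun (p : Int × Int) => (p.1, PySem.List.pyGetD (d0 :: rest) p.1 0))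
       let similar_index := closest_numbers.map (fun (c : Int × Int) => c.1)
       let similar_ds := closest_numbers.map (fun (c : Int × Int) => c.2)
       let similar_ds_sort := PySem.List.sorted (PySem.List.pyRange 0 (PySem.List.len distances))
           (fun i => PySem.List.pyGetD distances i 0) false
       ((similar_ds, similar_index, min_distance, similar_ds_sort) : List Int × List Int × Int × List Int)) =
    (let st := pvScan ids rest 1 (|ids - d0|) [0]
     let min_distance := st.1
     let similar_index := st.2
     let similar_ds := similar_index.map (fun i => PySem.List.pyGetD (d0 :: rest) i 0)
     let similar_ds_sort := PySem.List.sorted (PySem.List.pyRange 0 (PySem.List.len (d0 :: rest)))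
         (fun i => |ids - PySem.List.pyGetD (d0 :: rest) i 0|) false
     ((similar_ds, similar_index, min_distance, similar_ds_sort) : List Int × List Int × Int × List Int)) := by
  -- the common minimum
  have hm : PySem.List.min? ((d0 :: rest).map (fun num => |ids - num|)) (fun x => x) =
      some ((rest.map (fun num => |ids - num|)).foldl min (|ids - d0|)) := by
    rw [List.map_cons]
    exact PySem.List.min?_id_cons _ _
  have hscan := pvScan_spec ids rest 1 (|ids - d0|) [0]
  have hlen : PySem.List.len ((d0 :: rest).map (fun num => |ids - num|)) =
      PySem.List.len (d0 :: rest) := by simp [PySem.List.len]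
  -- the sort keys agree on the range indices
  have hsort : PySem.List.sorted (PySem.List.pyRange 0 (PySem.List.len (d0 :: rest)))
        (fun i => PySem.List.pyGetD ((d0 :: rest).map (fun num => |ids - num|)) i 0) false =
      PySem.List.sorted (PySem.List.pyRange 0 (PySem.List.len (d0 :: rest)))
        (fun i => |ids - PySem.List.pyGetD (d0 :: rest) i 0|) false := by
    apply pv_sorted_congr
    intro j hj
    obtain ⟨h0, h1⟩ := PySem.List.mem_pyRange_one.mp hj
    have h1' : j < ((d0 :: rest).length : Int) := by simpa [PySem.List.len] using h1
    rw [PySem.List.pyGetD_eq_getElem (d0 :: rest) 0 h0 h1',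
        PySem.List.pyGetD_eq_getElem ((d0 :: rest).map (fun num => |ids - num|)) 0 h0 (by simpa using h1')]
    simp only [List.getElem_map]
  -- A's index list = B's index list
  have hidx : (((PySem.List.enumerate ((d0 :: rest).map (fun num => |ids - num|))).filter
        (fun (p : Int × Int) => p.2 == (rest.map (fun num => |ids - num|)).foldl min (|ids - d0|))).map
        (fun (p : Int × Int) => (p.1, PySem.List.pyGetD (d0 :: rest) p.1 0))).map (fun (c : Int × Int) => c.1) =
      (pvScan ids rest 1 (|ids - d0|) [0]).2 := by
    rw [hscan]
    rw [List.map_map]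
    have hcomp : ((fun (c : Int × Int) => c.1) ∘ (fun (p : Int × Int) => (p.1, PySem.List.pyGetD (d0 :: rest) p.1 0))) =
        (Prod.fst : Int × Int → Int) := rfl
    rw [hcomp, List.map_cons, PySem.List.enumerate_cons]
    set m := (rest.map (fun num => |ids - num|)).foldl min (|ids - d0|) with hmdef
    by_cases h : |ids - d0| = m
    · have hb : (|ids - d0| == m) = true := by simp [h]
      simp only [List.filter_cons, hb, if_pos, List.map_cons, zero_add]
      rw [pv_enum_filter ids m rest 1, if_pos h.symm]
      rfl
    · have hb : (|ids - d0| == m) = false := by simp [h]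
      simp only [List.filter_cons, hb, Bool.false_eq_true, if_false, zero_add]
      rw [pv_enum_filter ids m rest 1, if_neg (fun hh => h hh.symm)]
      rfl
  -- assemble
  simp only [hm, hlen, hsort]
  rw [← hidx]
  refine Prod.ext ?_ (Prod.ext rfl (Prod.ext ?_ rfl))
  · simp [List.map_map, Function.comp_def]
  · rw [hscan]

-- ===== VERDICT (by name: the statement is the Claim_ definition above) =====
theorem get_similar_ds_spec : Claim_equal_get_similar_ds := by
  intro iw ids dl _ hpre
  unfold Spec_get_similar_ds get_similar_ds get_similar_ds_alt
  obtain ⟨d0, rest, hC⟩ := List.exists_cons_of_ne_nil hpre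
  rw [hC]
  exact pv_main ids d0 rest
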